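-- pv_equiv track=rewrite | github.com/ebelova-pppl/NOVA_modes | scripts/split_tae_eae.py | _infer_default_header
-- ===== SOURCE A (Python) =====
-- KNOWN_VALIDITY_VALUES = {"good", "bad", "skip"}
--
-- KNOWN_FAMILY_VALUES = {"tae", "eae", "none"}
--
-- def _observed_values(rows: list[list[str]], idx: int) -> set[str]:
--     values = set()
--     for row in rows:
--         if idx < len(row):
--             value = row[idx].strip().lower()
--             if value:
--                 values.add(value)
--     return values
--
-- def _infer_default_header(raw_rows: list[list[str]], max_width: int) -> list[str]:
--     if max_width <= 0:
--         return []
--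
--     header = ["path"]
--     if max_width == 1:
--         return header
--
--     second_values = _observed_values(raw_rows, 1)
--     if second_values and second_values <= KNOWN_VALIDITY_VALUES:
--         header.append("validity")
--     else:
--         header.append("col2")
--
--     if max_width >= 3:
--         third_values = _observed_values(raw_rows, 2)
--         if third_values and third_values <= KNOWN_FAMILY_VALUES:
--             header.append("family")
--         else:
--             header.append("col3")
--
--     if max_width > 3:
--         header.extend(f"col{idx}" for idx in range(4, max_width + 1))
--
--     return header
-- ===== SOURCE B (Python) =====
-- KNOWN_VALIDITY_VALUES = {"good", "bad", "skip"}
--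
-- KNOWN_FAMILY_VALUES = {"tae", "eae", "none"}
--
-- _RULES = {1: (KNOWN_VALIDITY_VALUES, "validity"), 2: (KNOWN_FAMILY_VALUES, "family")}
--
--
-- def _column_name(raw_rows, i):
--     if i == 0:
--         return "path"
--     rule = _RULES.get(i)
--     if rule is not None:
--         allowed, name = rule
--         vals = [v for v in (row[i].strip().lower() for row in raw_rows if i < len(row)) if v]
--         if vals and all(v in allowed for v in vals):
--             return name
--     return f"col{i + 1}"
--
--
-- def _infer_default_header(raw_rows, max_width):
--     return [_column_name(raw_rows, i) for i in range(max_width)]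
-- ===== Notes on version B (the rewrite author's own statement) =====
-- stated objective: simpler
-- what changed: A's hand-unrolled special cases (early returns for width 0/1, separate validity/family blocks, a trailing extend) are replaced by one uniform loop over range(max_width) that names each column via a rule table {1: validity, 2: family}, checking non-empty-and-all-allowed directly on the observed value list instead of building a set.
import Mathlib
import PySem

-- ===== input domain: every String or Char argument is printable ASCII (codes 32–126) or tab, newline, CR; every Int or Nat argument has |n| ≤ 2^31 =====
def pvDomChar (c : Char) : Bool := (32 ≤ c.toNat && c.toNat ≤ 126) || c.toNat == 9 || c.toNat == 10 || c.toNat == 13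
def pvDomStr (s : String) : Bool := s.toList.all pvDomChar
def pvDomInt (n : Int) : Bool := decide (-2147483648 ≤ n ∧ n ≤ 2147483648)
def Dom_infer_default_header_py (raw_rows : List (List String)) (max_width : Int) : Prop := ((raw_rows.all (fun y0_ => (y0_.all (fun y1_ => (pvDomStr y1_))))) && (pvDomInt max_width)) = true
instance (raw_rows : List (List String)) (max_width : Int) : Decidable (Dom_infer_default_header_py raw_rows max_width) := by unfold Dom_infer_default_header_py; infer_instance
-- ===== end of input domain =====

-- B replaces A's unrolled per-column branches by one loop over range(max_width) driven
-- by a rule table (objective: simpler / more uniform decomposition; not faster).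

-- ===== PORT A =====
def KNOWN_VALIDITY_VALUES : PySem.Set String := PySem.Set.ofList ["good", "bad", "skip"]

def KNOWN_FAMILY_VALUES : PySem.Set String := PySem.Set.ofList ["tae", "eae", "none"]

def observed_values (rows : List (List String)) (idx : Int) : PySem.Set String :=
  rows.foldl (fun values row =>
    if idx < (row.length : Int) then
      match PySem.List.pyGet? row idx with
      | some s =>
          let value := PySem.Str.lower (PySem.Str.strip s)
          if value ≠ "" then PySem.Set.add values value else values
      | none => values
    else values) PySem.Set.empty

def infer_default_header_py (raw_rows : List (List String)) (max_width : Int) : List String :=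
  if max_width ≤ 0 then []
  else
    let header := ["path"]
    if max_width = 1 then header
    else
      let second_values := observed_values raw_rows 1
      let header := header ++
        [if second_values ≠ [] ∧ PySem.Set.issubset second_values KNOWN_VALIDITY_VALUES = true
         then "validity" else "col2"]
      let header :=
        if 3 ≤ max_width then
          let third_values := observed_values raw_rows 2
          header ++
            [if third_values ≠ [] ∧ PySem.Set.issubset third_values KNOWN_FAMILY_VALUES = true
             then "family" else "col3"]
        else header
      let header :=
        if 3 < max_width then
          header ++ (PySem.List.pyRange 4 (max_width + 1) 1).map (fun idx => "col" ++ PySem.Int.toStr idx)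
        else header
      header

-- ===== PORT B =====
def pvRules : PySem.Dict Int (PySem.Set String × String) :=
  (PySem.Dict.empty.insert 1 (KNOWN_VALIDITY_VALUES, "validity")).insert 2 (KNOWN_FAMILY_VALUES, "family")

-- the inner generator-comprehension of _column_name: stripped/lowered non-empty entries of column i
def pvColVals (raw_rows : List (List String)) (i : Int) : List String :=
  raw_rows.filterMap (fun row =>
    if i < (row.length : Int) then
      match PySem.List.pyGet? row i with
      | some s =>
          let v := PySem.Str.lower (PySem.Str.strip s)
          if v ≠ "" then some v else none
      | none => none
    else none)

def pvColumnName (raw_rows : List (List String)) (i : Int) : String :=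
  if i = 0 then "path"
  else
    match PySem.Dict.get? pvRules i with
    | some (allowed, name) =>
        let vals := pvColVals raw_rows i
        if vals ≠ [] ∧ vals.all (fun v => PySem.Set.contains allowed v) = true then name
        else "col" ++ PySem.Int.toStr (i + 1)
    | none => "col" ++ PySem.Int.toStr (i + 1)

def infer_default_header_py_alt (raw_rows : List (List String)) (max_width : Int) : List String :=
  (PySem.List.pyRange 0 max_width 1).map (pvColumnName raw_rows)

-- ===== PRECONDITION & SPEC =====
def Spec_infer_default_header_py (raw_rows : List (List String)) (max_width : Int) (out : List String) : Prop := out = infer_default_header_py_alt raw_rows max_width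
instance (raw_rows : List (List String)) (max_width : Int) (out : List String) : Decidable (Spec_infer_default_header_py raw_rows max_width out) := by unfold Spec_infer_default_header_py; infer_instance

-- ===== CLAIM (what is proved, stated in full; the proofs are below) =====
def Claim_equal_infer_default_header_py : Prop := ∀ (raw_rows : List (List String)) (max_width : Int), Dom_infer_default_header_py raw_rows max_width → Spec_infer_default_header_py raw_rows max_width (infer_default_header_py raw_rows max_width)

-- ===== LEMMAS AND PROOFS =====

-- A's set of observed values is set() of B's value list
theorem foldl_add_filterMap {α β : Type} [BEq β] (f : α → Option β) (rows : List α) (acc : PySem.Set β) :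
    rows.foldl (fun values row => match f row with
      | some v => PySem.Set.add values v
      | none => values) acc
      = (rows.filterMap f).foldl PySem.Set.add acc := by
  induction rows generalizing acc with
  | nil => rfl
  | cons r rs ih =>
    simp only [List.foldl_cons, List.filterMap_cons]
    cases f r <;> simp [ih]

theorem observed_eq_ofList (rows : List (List String)) (idx : Int) :
    observed_values rows idx = PySem.Set.ofList (pvColVals rows idx) := by
  have := foldl_add_filterMap (fun row =>
    if idx < ((row : List String).length : Int) then
      match PySem.List.pyGet? row idx with
      | some s =>
          let v := PySem.Str.lower (PySem.Str.strip s)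
          if v ≠ "" then some v else none
      | none => none
    else none) rows PySem.Set.empty
  rw [PySem.Set.ofList_eq_foldl]
  unfold observed_values pvColVals
  have he : (PySem.Set.empty : PySem.Set String) = [] := rfl
  rw [he] at this
  rw [← this]
  congr 1
  funext values row
  by_cases h : idx < ((row : List String).length : Int)
  · simp only [h, if_pos]
    cases PySem.List.pyGet? row idx with
    | none => rfl
    | some s => by_cases hv : PySem.Str.lower (PySem.Str.strip s) ≠ "" <;> simp [hv]
  · simp [h]

-- the truthy-and-subset test on the set equals B's list test
theorem cond_eq (rows : List (List String)) (idx : Int) (allowed : PySem.Set String) :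
    (observed_values rows idx ≠ [] ∧ PySem.Set.issubset (observed_values rows idx) allowed = true)
      ↔ (pvColVals rows idx ≠ [] ∧ (pvColVals rows idx).all (fun v => PySem.Set.contains allowed v) = true) := by
  rw [observed_eq_ofList]
  constructor
  · rintro ⟨hne, hsub⟩
    rw [PySem.Set.issubset_iff] at hsub
    refine ⟨?_, ?_⟩
    · intro h; apply hne; rw [h]; rfl
    · rw [List.all_eq_true]
      intro v hv
      rw [PySem.Set.contains_iff]
      exact hsub v ((PySem.Set.mem_ofList _ _).mpr hv)
  · rintro ⟨hne, hall⟩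
    rw [List.all_eq_true] at hall
    refine ⟨?_, ?_⟩
    · intro h
      rcases List.exists_mem_of_ne_nil _ hne with ⟨v, hv⟩
      have : v ∈ PySem.Set.ofList (pvColVals rows idx) := (PySem.Set.mem_ofList _ _).mpr hv
      simp [h] at this
    · rw [PySem.Set.issubset_iff]
      intro v hv
      exact (PySem.Set.contains_iff _ _).mp (hall v ((PySem.Set.mem_ofList _ _).mp hv))

theorem columnName_hi (rows : List (List String)) (i : Int) (h1 : i ≠ 0) (h2 : i ≠ 1) (h3 : i ≠ 2) :
    pvColumnName rows i = "col" ++ PySem.Int.toStr (i + 1) := by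
  unfold pvColumnName pvRules
  rw [if_neg h1, PySem.Dict.get?_insert_of_ne _ _ h3, PySem.Dict.get?_insert_of_ne _ _ h2,
    PySem.Dict.get?_empty]

-- ===== VERDICT (by name: the statement is the Claim_ definition above) =====
-- B's single-branch entries at columns 1 and 2 equal A's per-column if-expressions
theorem entry_eq (rows : List (List String)) (idx : Int) (allowed : PySem.Set String)
    (name : String) (hget : PySem.Dict.get? pvRules idx = some (allowed, name)) (hne : idx ≠ 0)
    (other : String) (hother : other = "col" ++ PySem.Int.toStr (idx + 1)) :
    (if observed_values rows idx ≠ [] ∧ PySem.Set.issubset (observed_values rows idx) allowed = true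
     then name else other) = pvColumnName rows idx := by
  unfold pvColumnName
  rw [if_neg hne, hget]
  dsimp only
  by_cases h : observed_values rows idx ≠ [] ∧ PySem.Set.issubset (observed_values rows idx) allowed = true
  · rw [if_pos h, if_pos ((cond_eq rows idx allowed).mp h)]
  · rw [if_neg h, if_neg (fun hc => h ((cond_eq rows idx allowed).mpr hc)), hother]

-- the tail of column names past index 2 is A's extended col-range
theorem tail_eq (rows : List (List String)) (n : Int) (h : 3 < n) :
    (PySem.List.pyRange 3 n 1).map (pvColumnName rows)
      = (PySem.List.pyRange 4 (n + 1) 1).map (fun idx => "col" ++ PySem.Int.toStr idx) := by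
  have h1 : (PySem.List.pyRange 3 n 1).map (pvColumnName rows)
      = (PySem.List.pyRange 3 n 1).map (fun i => "col" ++ PySem.Int.toStr (i + 1)) := by
    apply List.map_congr_left
    intro i hi
    have := (PySem.List.mem_pyRange_one).mp hi
    exact columnName_hi rows i (by omega) (by omega) (by omega)
  rw [h1, PySem.List.pyRange_one 3 n, PySem.List.pyRange_one 4 (n + 1)]
  have hn : (n - 3).toNat = (n + 1 - 4).toNat := by omega
  rw [← hn, List.map_map, List.map_map]
  apply List.map_congr_left
  intro k _
  simp only [Function.comp_apply]
  congr 2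
  omega

theorem infer_default_header_py_spec : Claim_equal_infer_default_header_py := by
  intro rows n _
  unfold Spec_infer_default_header_py infer_default_header_py infer_default_header_py_alt
  by_cases h0 : n ≤ 0
  · rw [if_pos h0, PySem.List.pyRange_one_eq_nil h0, List.map_nil]
  rw [if_neg h0]
  by_cases h1 : n = 1
  · subst h1
    rw [if_pos rfl]
    rfl
  rw [if_neg h1]
  dsimp only
  have hval : PySem.Dict.get? pvRules 1 = some (KNOWN_VALIDITY_VALUES, "validity") := by decide
  have hfam : PySem.Dict.get? pvRules 2 = some (KNOWN_FAMILY_VALUES, "family") := by decide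
  have e1 := entry_eq rows 1 KNOWN_VALIDITY_VALUES "validity" hval (by decide) "col2" (by decide)
  have e2 := entry_eq rows 2 KNOWN_FAMILY_VALUES "family" hfam (by decide) "col3" (by decide)
  by_cases h3 : 3 ≤ n
  · rw [if_pos h3]
    have hsplit : PySem.List.pyRange 0 n 1 = [0, 1, 2] ++ PySem.List.pyRange 3 n 1 := by
      rw [PySem.List.pyRange_one_append 0 3 n (by omega) h3]
      rfl
    rw [hsplit, List.map_append]
    simp only [List.map_cons, List.map_nil]
    by_cases h4 : 3 < n
    · rw [if_pos h4, tail_eq rows n h4, e1, e2]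
      rfl
    · rw [if_neg h4, PySem.List.pyRange_one_eq_nil (by omega : n ≤ 3), List.map_nil, e1, e2]
      rfl
  · rw [if_neg h3, if_neg (by omega : ¬ 3 < n)]
    have h2 : n = 2 := by omega
    subst h2
    have hr : PySem.List.pyRange 0 2 1 = [0, 1] := by decide
    rw [hr, List.map_cons, List.map_cons, List.map_nil, e1]
    rfl
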